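-- pv_equiv track=rewrite | github.com/marcelocsjunior/BOT.NOC.IA | noc_bot/utils.py | split_telegram_chunks
-- ===== SOURCE A (Python) =====
-- def split_telegram_chunks(text: str, limit: int = 3900) -> list[str]:
--     if not text:
--         return [""]
--     out, s = [], text
--     while len(s) > limit:
--         cut = s.rfind("\n", 0, limit)
--         if cut < 0:
--             cut = limit
--         out.append(s[:cut].rstrip("\n"))
--         s = s[cut:].lstrip("\n")
--     out.append(s)
--     return out
-- ===== SOURCE B (Python) =====
-- def split_telegram_chunks(text: str, limit: int = 3900) -> list[str]:
--     if not text: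
--         return [""]
--     out = []
--     i, n = 0, len(text)
--     while n - i > limit:
--         cut = text.rfind("\n", i, i + limit)
--         if cut < 0:
--             cut = i + limit
--         j = cut
--         while j > i and text[j - 1] == "\n":
--             j -= 1
--         out.append(text[i:j])
--         i = cut
--         while i < n and text[i] == "\n":
--             i += 1
--     out.append(text[i:])
--     return out
-- ===== Notes on version B (the rewrite author's own statement) =====
-- stated objective: alternative
-- what changed: B walks the original text with an integer cursor (rfind on an index window plus two index scans replacing rstrip/lstrip) instead of repeatedly reslicing and reassigning the remaining suffix string; intended to avoid the per-iteration suffix copies, measured about 1.5x at large sizes (unconfirmed as faster).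
import Mathlib
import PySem

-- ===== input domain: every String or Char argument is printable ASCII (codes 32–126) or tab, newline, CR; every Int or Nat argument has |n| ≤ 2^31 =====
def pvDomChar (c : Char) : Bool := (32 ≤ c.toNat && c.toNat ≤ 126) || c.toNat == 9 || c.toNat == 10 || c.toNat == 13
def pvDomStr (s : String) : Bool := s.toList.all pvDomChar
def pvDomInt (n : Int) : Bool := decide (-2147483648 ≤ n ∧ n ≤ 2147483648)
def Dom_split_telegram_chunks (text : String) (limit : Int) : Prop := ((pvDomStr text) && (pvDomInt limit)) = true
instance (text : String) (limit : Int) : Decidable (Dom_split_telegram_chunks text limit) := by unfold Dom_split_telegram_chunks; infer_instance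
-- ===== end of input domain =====

-- B replaces A's repeated suffix reslicing by a single integer cursor into the fixed text
-- (rfind on an index window; index scans instead of rstrip/lstrip), avoiding per-iteration suffix copies.


-- ===== PORT A =====
-- Python s.rfind("\n", start, start+k): rightmost index j in [start, start+k) with s[j] = '\n'
-- (scans from the right, as rfind does; exact while the window lies inside the string,
-- as it does at every call site reached when the Python returns; shared by both ports, with different windows).
def pvRfindNl (cs : List Char) (start : Nat) : Nat → Option Nat
  | 0 => none
  | k+1 => if cs.getD (start + k) ' ' = '\n' then some (start + k) else pvRfindNl cs start k

-- Python u.rstrip("\n") / u.lstrip("\n")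
def pvRstripNl (u : List Char) : List Char := (u.reverse.dropWhile (· = '\n')).reverse
def pvLstripNl (u : List Char) : List Char := u.dropWhile (· = '\n')

-- A's while-loop over the remaining suffix s (fuel = length of the text + 1 at the call
-- site bounds the iterations: wherever the Python loop terminates it strictly shortens s each step).
def pvALoop (limit : Nat) : Nat → List Char → List (List Char)
  | 0, _ => []
  | f+1, s =>
    if limit < s.length then
      let cut := (pvRfindNl s 0 limit).getD limit
      pvRstripNl (s.take cut) :: pvALoop limit f (pvLstripNl (s.drop cut))
    else [s]

-- exact wherever the Python returns (for limit ≤ 0 with nonempty text the Python while-loop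
-- diverges except on all-newline texts with limit = 0, which the port matches)
def split_telegram_chunks (text : String) (limit : Int) : List String :=
  if text = "" then [""]
  else (pvALoop limit.toNat (text.toList.length + 1) text.toList).map (fun l => String.ofList l)

-- ===== PORT B =====
-- B's backward scan: while j > i and text[j-1] == "\n": j -= 1
def pvScanBack (cs : List Char) (i : Nat) (j : Nat) : Nat :=
  if h : i < j ∧ cs.getD (j - 1) ' ' = '\n' then pvScanBack cs i (j - 1) else j
  termination_by j
  decreasing_by omega

-- B's forward scan: while i < n and text[i] == "\n": i += 1
def pvScanFwd (cs : List Char) (i : Nat) : Nat :=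
  if h : i < cs.length ∧ cs.getD i ' ' = '\n' then pvScanFwd cs (i + 1) else i
  termination_by cs.length - i
  decreasing_by omega

-- B's while-loop: cursor i into the fixed text (text[i:j] = (cs.take j).drop i for i ≤ j ≤ n)
def pvBLoop (cs : List Char) (limit : Nat) : Nat → Nat → List (List Char)
  | 0, _ => []
  | f+1, i =>
    if i + limit < cs.length then
      let cut := (pvRfindNl cs i limit).getD (i + limit)
      let j := pvScanBack cs i cut
      (cs.take j).drop i :: pvBLoop cs limit f (pvScanFwd cs cut)
    else [cs.drop i]

-- exact wherever the Python returns (same remark as for port A)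
def split_telegram_chunks_alt (text : String) (limit : Int) : List String :=
  if text = "" then [""]
  else (pvBLoop text.toList limit.toNat (text.toList.length + 1) 0).map (fun l => String.ofList l)

-- ===== PRECONDITION & SPEC =====
def Spec_split_telegram_chunks (text : String) (limit : Int) (out : List String) : Prop := out = split_telegram_chunks_alt text limit
instance (text : String) (limit : Int) (out : List String) : Decidable (Spec_split_telegram_chunks text limit out) := by unfold Spec_split_telegram_chunks; infer_instance

-- ===== CLAIM (what is proved, stated in full; the proofs are below) =====
def Claim_equal_split_telegram_chunks : Prop := ∀ (text : String) (limit : Int), Dom_split_telegram_chunks text limit → Spec_split_telegram_chunks text limit (split_telegram_chunks text limit)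

-- ===== LEMMAS AND PROOFS =====

theorem pvGetD_drop (cs : List Char) (i m : Nat) (d : Char) :
    (cs.drop i).getD m d = cs.getD (i + m) d := by
  simp [List.getD_eq_getElem?_getD, List.getElem?_drop]

-- rfind on the suffix cs.drop i equals rfind on cs with the window shifted by i
theorem pvRfindNl_drop (cs : List Char) (i : Nat) :
    ∀ k, pvRfindNl (cs.drop i) 0 k = (pvRfindNl cs i k).map (fun j => j - i) := by
  intro k
  induction k with
  | zero => rfl
  | succ k ih =>
      simp only [pvRfindNl, pvGetD_drop, Nat.zero_add]
      split_ifs with h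
      · simp
      · exact ih

theorem pvRfindNl_range (cs : List Char) (start : Nat) :
    ∀ k j, pvRfindNl cs start k = some j → start ≤ j ∧ j < start + k := by
  intro k
  induction k with
  | zero => intro j h; simp [pvRfindNl] at h
  | succ k ih =>
      intro j h
      simp only [pvRfindNl] at h
      split_ifs at h with hc
      · cases h; omega
      · have := ih j h; omega

-- the backward scan computes exactly the rstrip("\n") of the candidate chunk
theorem pvScanBack_rstrip (cs : List Char) (i : Nat) :
    ∀ j, i ≤ j → j ≤ cs.length →
      (cs.take (pvScanBack cs i j)).drop i = pvRstripNl ((cs.take j).drop i) := by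
  intro j
  induction j with
  | zero =>
      intro hij _
      rw [pvScanBack]
      simp [pvRstripNl]
  | succ j ih =>
      intro hij hlen
      have hjlt : j < cs.length := by omega
      have htake : cs.take (j + 1) = cs.take j ++ [cs[j]] := by
        rw [List.take_add_one, List.getElem?_eq_getElem hjlt]; rfl
      rw [pvScanBack]
      split_ifs with h
      · -- last char of the candidate chunk is '\n'
        have hle : i ≤ j := by have := h.1; omega
        have hnl : cs[j] = '\n' := by
          have := h.2
          simpa [List.getD_eq_getElem?_getD, List.getElem?_eq_getElem hjlt] using this
        have hdrop : (cs.take (j + 1)).drop i = (cs.take j).drop i ++ [cs[j]] := by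
          rw [htake, List.drop_append_of_le_length (by simp; omega)]
        rw [Nat.add_sub_cancel, ih hle (by omega), hdrop, hnl]
        simp [pvRstripNl]
      · -- scan stops at j+1
        rcases Nat.lt_or_ge i (j + 1) with hlt | hge
        · -- i ≤ j and cs[j] ≠ '\n' : rstrip keeps the chunk
          have hle : i ≤ j := by omega
          have hnl : ¬ cs[j] = '\n' := by
            intro hc
            exact h ⟨by omega, by simp [List.getD_eq_getElem?_getD, List.getElem?_eq_getElem hjlt, hc]⟩
          have hdrop : (cs.take (j + 1)).drop i = (cs.take j).drop i ++ [cs[j]] := by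
            rw [htake, List.drop_append_of_le_length (by simp; omega)]
          rw [hdrop]
          simp [pvRstripNl, hnl]
        · -- i = j+1 : empty chunk
          have : i = j + 1 := by omega
          subst this
          have h1 : (cs.take (j + 1)).drop (j + 1) = ([] : List Char) :=
            List.drop_eq_nil_of_le (by simp)
          rw [h1]
          simp [pvRstripNl]

-- the forward scan computes exactly the lstrip("\n") of the remaining suffix
theorem pvScanFwd_lstrip (cs : List Char) : ∀ i, pvLstripNl (cs.drop i) = cs.drop (pvScanFwd cs i) := by
  intro i
  fun_induction pvScanFwd cs i with
  | case1 i h ih =>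
      obtain ⟨hlt, hnl⟩ := h
      have hget : cs[i] = '\n' := by
        simpa [List.getD_eq_getElem?_getD, List.getElem?_eq_getElem hlt] using hnl
      rw [← ih, List.drop_eq_getElem_cons hlt]
      simp [pvLstripNl, List.dropWhile, hget]
  | case2 i h =>
      rcases Nat.lt_or_ge i cs.length with hlt | hge
      · have hnl : ¬ cs[i] = '\n' := by
          intro hc
          exact h ⟨hlt, by simp [List.getD_eq_getElem?_getD, List.getElem?_eq_getElem hlt, hc]⟩
        rw [List.drop_eq_getElem_cons hlt]
        simp [pvLstripNl, List.dropWhile, hnl]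
      · rw [List.drop_eq_nil_of_le hge]
        rfl

theorem pvScanFwd_le (cs : List Char) : ∀ i, i ≤ cs.length → pvScanFwd cs i ≤ cs.length := by
  intro i
  fun_induction pvScanFwd cs i with
  | case1 i h ih => exact fun _ => ih (by omega)
  | case2 i h => exact fun hi => hi

-- lockstep correspondence of the two loops: A's suffix s is always cs.drop i for B's cursor i
theorem pvLoop_eq (cs : List Char) (limit : Nat) :
    ∀ f i, i ≤ cs.length → pvALoop limit f (cs.drop i) = pvBLoop cs limit f i := by
  intro f
  induction f with
  | zero => intro i _; rfl
  | succ f ih =>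
      intro i hi
      simp only [pvALoop, pvBLoop, List.length_drop]
      by_cases hc : i + limit < cs.length
      · rw [if_pos (by omega), if_pos hc]
        -- relate the two rfind results
        have hfind := pvRfindNl_drop cs i limit
        -- cutB = i + cutA in both cases of the rfind
        have hcut : i + (pvRfindNl (cs.drop i) 0 limit).getD limit
            = (pvRfindNl cs i limit).getD (i + limit) := by
          rw [hfind]
          cases hr : pvRfindNl cs i limit with
          | none => simp
          | some j =>
              have := pvRfindNl_range cs i limit j hr
              simp; omega
        set cutA := (pvRfindNl (cs.drop i) 0 limit).getD limit with hA
        have hAle : cutA ≤ limit := by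
          rw [hA, hfind]
          cases hr : pvRfindNl cs i limit with
          | none => simp
          | some j =>
              have := pvRfindNl_range cs i limit j hr
              simp; omega
        have hcutle : i + cutA ≤ cs.length := by omega
        -- chunks agree
        have htd : (cs.drop i).take cutA = (cs.take (i + cutA)).drop i := by
          rw [List.drop_take]; congr 1; omega
        have hchunk : pvRstripNl ((cs.drop i).take cutA)
            = (cs.take (pvScanBack cs i (i + cutA))).drop i := by
          rw [htd, pvScanBack_rstrip cs i (i + cutA) (by omega) hcutle]
        -- tails agree
        have htail : pvLstripNl ((cs.drop i).drop cutA) = cs.drop (pvScanFwd cs (i + cutA)) := by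
          rw [List.drop_drop]; exact pvScanFwd_lstrip cs (i + cutA)
        rw [hchunk, htail, ← hcut,
          ih (pvScanFwd cs (i + cutA)) (pvScanFwd_le cs (i + cutA) hcutle)]
      · rw [if_neg (by omega), if_neg hc]

-- ===== VERDICT (by name: the statement is the Claim_ definition above) =====
theorem split_telegram_chunks_spec : Claim_equal_split_telegram_chunks := by
  intro text limit _
  unfold Spec_split_telegram_chunks split_telegram_chunks split_telegram_chunks_alt
  by_cases h : text = ""
  · simp [h]
  · rw [if_neg h, if_neg h]
    have := pvLoop_eq text.toList limit.toNat (text.toList.length + 1) 0 (Nat.zero_le _)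
    rw [List.drop_zero] at this
    rw [this]
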